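-- pv_equiv track=rewrite | github.com/hortune/judge | codeforce/631_div2/e.py | check_delete_height
-- ===== SOURCE A (Python) =====
-- def check_delete_height(i, nums):
--     if 2 * i >= len(nums) or (nums[2*i] == 0 and nums[2*i + 1] == 0):
--         return int.bit_length(i)
--     if nums[2*i] == 0:
--         return check_delete_height(2*i + 1, nums)
--     if nums[2*i + 1] == 0:
--         return check_delete_height(2*i, nums)
--     if nums[2*i + 1] > nums[2*i]:
--         return check_delete_height(2*i + 1, nums)
--     return check_delete_height(2*i, nums)
-- ===== SOURCE B (Python) =====
-- def check_delete_height(i, nums):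
--     # iterative descent: one mutable index, branchless child choice
--     while 2 * i < len(nums) and not (nums[2*i] == 0 and nums[2*i+1] == 0):
--         l, r = nums[2*i], nums[2*i+1]
--         i = 2*i + (1 if l == 0 or (r != 0 and r > l) else 0)
--     return int.bit_length(i)
-- ===== Notes on version B (the rewrite author's own statement) =====
-- stated objective: simpler
-- what changed: Replaced the four-way tail recursion by a while loop over a single mutable index whose child choice is one boolean expression (i = 2*i + (1 if l==0 or (r!=0 and r>l) else 0)), equal cost, plainer control flow.
-- outside the precondition, e.g. on check_delete_height(1, [9, 9, 0, 0, 7]): A returns 1, B returns 1; on check_delete_height(0, []): A returns 0, B returns 0; on check_delete_height(1, [1, 2, 3]): A raises IndexError, B raises IndexError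
import Mathlib
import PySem

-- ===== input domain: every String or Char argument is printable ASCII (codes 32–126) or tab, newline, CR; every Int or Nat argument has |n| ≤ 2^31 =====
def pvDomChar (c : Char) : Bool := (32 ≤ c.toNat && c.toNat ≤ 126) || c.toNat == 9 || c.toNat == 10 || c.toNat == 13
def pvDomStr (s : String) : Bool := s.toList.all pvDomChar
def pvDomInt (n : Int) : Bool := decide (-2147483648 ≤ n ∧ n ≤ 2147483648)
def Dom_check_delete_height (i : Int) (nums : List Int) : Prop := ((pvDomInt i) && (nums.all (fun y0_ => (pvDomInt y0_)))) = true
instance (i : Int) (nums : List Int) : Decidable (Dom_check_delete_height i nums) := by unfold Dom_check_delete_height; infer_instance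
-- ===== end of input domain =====

-- B rewrites A's four-way tail recursion as a while loop with a one-expression child choice; objective: simpler.

-- ===== PORT A =====
-- fuel (nums.length + 1) only makes the recursion total; inside Pre_ the index
-- strictly increases each step, so the fuel is never exhausted.
def checkDHGoA (fuel : Nat) (i : Int) (nums : List Int) : Int :=
  match fuel with
  | 0 => (PySem.Int.bitLength i : Int)
  | f + 1 =>
    if (nums.length : Int) ≤ 2 * i ∨
        (PySem.List.pyGetD nums (2 * i) 0 = 0 ∧ PySem.List.pyGetD nums (2 * i + 1) 0 = 0) then
      (PySem.Int.bitLength i : Int)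
    else if PySem.List.pyGetD nums (2 * i) 0 = 0 then checkDHGoA f (2 * i + 1) nums
    else if PySem.List.pyGetD nums (2 * i + 1) 0 = 0 then checkDHGoA f (2 * i) nums
    else if PySem.List.pyGetD nums (2 * i) 0 < PySem.List.pyGetD nums (2 * i + 1) 0 then
      checkDHGoA f (2 * i + 1) nums
    else checkDHGoA f (2 * i) nums

def check_delete_height (i : Int) (nums : List Int) : Int :=
  checkDHGoA (nums.length + 1) i nums

-- ===== PORT B =====
-- one loop step: choose the child by a single boolean expression
def checkDHStep (nums : List Int) (i : Int) : Int :=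
  let l := PySem.List.pyGetD nums (2 * i) 0
  let r := PySem.List.pyGetD nums (2 * i + 1) 0
  2 * i + (if l = 0 ∨ (r ≠ 0 ∧ l < r) then 1 else 0)

-- the while loop (same fuel bound, for totality only)
def checkDHLoop (fuel : Nat) (nums : List Int) (i : Int) : Int :=
  match fuel with
  | 0 => i
  | f + 1 =>
    if 2 * i < (nums.length : Int) ∧
        ¬(PySem.List.pyGetD nums (2 * i) 0 = 0 ∧ PySem.List.pyGetD nums (2 * i + 1) 0 = 0) then
      checkDHLoop f nums (checkDHStep nums i)
    else i

def check_delete_height_alt (i : Int) (nums : List Int) : Int :=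
  (PySem.Int.bitLength (checkDHLoop (nums.length + 1) nums i) : Int)

-- ===== PRECONDITION & SPEC =====
-- Pre_ excludes inputs where the Python A raises IndexError or diverges: i ≤ 0 (A
-- loops forever or walks off the left end), and odd-length lists with 2*i < len,
-- where the descent can step on the unpaired last slot nums[2*i+1] (IndexError);
-- even length, or an i already past the array, is always safe.
def Pre_check_delete_height (i : Int) (nums : List Int) : Prop :=
  1 ≤ i ∧ (nums.length % 2 = 0 ∨ (nums.length : Int) ≤ 2 * i)
instance (i : Int) (nums : List Int) : Decidable (Pre_check_delete_height i nums) := by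
  unfold Pre_check_delete_height; infer_instance

def pvWitness_check_delete_height : Int × List Int := (1, [5, 3, 2, 0])

def Spec_check_delete_height (i : Int) (nums : List Int) (out : Int) : Prop := out = check_delete_height_alt i nums
instance (i : Int) (nums : List Int) (out : Int) : Decidable (Spec_check_delete_height i nums out) := by unfold Spec_check_delete_height; infer_instance

-- ===== CLAIM (what is proved, stated in full; the proofs are below) =====
def Claim_equal_check_delete_height : Prop := ∀ (i : Int) (nums : List Int), Dom_check_delete_height i nums → Pre_check_delete_height i nums → Spec_check_delete_height i nums (check_delete_height i nums)

-- ===== LEMMAS AND PROOFS =====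

-- the recursion and the loop agree step for step, for any fuel and any start index
theorem checkDHGoA_eq_loop (fuel : Nat) (nums : List Int) :
    ∀ i : Int, checkDHGoA fuel i nums = (PySem.Int.bitLength (checkDHLoop fuel nums i) : Int) := by
  induction fuel with
  | zero => intro i; rfl
  | succ f ih =>
    intro i
    by_cases hstop : (nums.length : Int) ≤ 2 * i ∨
        (PySem.List.pyGetD nums (2 * i) 0 = 0 ∧ PySem.List.pyGetD nums (2 * i + 1) 0 = 0)
    · have hloop : ¬(2 * i < (nums.length : Int) ∧
          ¬(PySem.List.pyGetD nums (2 * i) 0 = 0 ∧ PySem.List.pyGetD nums (2 * i + 1) 0 = 0)) := by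
        intro hc
        rcases hstop with h | h
        · exact absurd h (not_le.mpr hc.1)
        · exact hc.2 h
      simp only [checkDHGoA, checkDHLoop, if_pos hstop, if_neg hloop]
    · have hloop : 2 * i < (nums.length : Int) ∧
          ¬(PySem.List.pyGetD nums (2 * i) 0 = 0 ∧ PySem.List.pyGetD nums (2 * i + 1) 0 = 0) :=
        ⟨not_le.mp (fun h => hstop (Or.inl h)), fun h => hstop (Or.inr h)⟩
      simp only [checkDHGoA, checkDHLoop, if_neg hstop, if_pos hloop]
      -- the branch A takes is exactly the child B's step computes
      split_ifs with h1 h2 h3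
      · rw [show checkDHStep nums i = 2 * i + 1 from by simp [checkDHStep, h1]]; exact ih _
      · rw [show checkDHStep nums i = 2 * i from by simp [checkDHStep, h1, h2]]; exact ih _
      · rw [show checkDHStep nums i = 2 * i + 1 from by simp [checkDHStep, h1, h2, h3]]
        exact ih _
      · rw [show checkDHStep nums i = 2 * i from by simp [checkDHStep, h1, h2, h3]]; exact ih _

-- ===== VERDICT (by name: the statement is the Claim_ definition above) =====
theorem check_delete_height_spec : Claim_equal_check_delete_height := by
  intro i nums _ _
  unfold Spec_check_delete_height check_delete_height check_delete_height_alt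
  exact checkDHGoA_eq_loop (nums.length + 1) nums i
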